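-- pv_equiv track=rewrite | github.com/michaelkimm/Algorithm-problem-solving-thought-process-re-record | Python/Programmers/stockPrice.py | solution
-- ===== SOURCE A (Python) =====
-- def solution(prices):
--     stack = []
--     answer = [0] * len(prices)
--     for i in range(len(prices)):
--         while stack and stack[-1][0] > prices[i]:
--             top_v, top_idx = stack.pop()
--             answer[top_idx] = i - top_idx
--         stack.append((prices[i], i))
--
--     while stack:
--         top_v, top_idx = stack.pop()
--         answer[top_idx] = len(prices) - 1 - top_idx
--     return answer
-- ===== SOURCE B (Python) =====
-- def solution(prices):
--     n = len(prices)
--     answer = [0] * n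
--     for i in range(n):
--         for j in range(i + 1, n):
--             if prices[j] < prices[i]:
--                 answer[i] = j - i
--                 break
--         else:
--             answer[i] = n - 1 - i
--     return answer
-- ===== Notes on version B (the rewrite author's own statement) =====
-- stated objective: simpler
-- what changed: Replaced the monotonic stack (pop-and-record on each drop plus a final drain) by a direct per-index forward scan that finds the first strictly smaller later price, with len-1-i as the no-drop fallback.
import Mathlib
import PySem

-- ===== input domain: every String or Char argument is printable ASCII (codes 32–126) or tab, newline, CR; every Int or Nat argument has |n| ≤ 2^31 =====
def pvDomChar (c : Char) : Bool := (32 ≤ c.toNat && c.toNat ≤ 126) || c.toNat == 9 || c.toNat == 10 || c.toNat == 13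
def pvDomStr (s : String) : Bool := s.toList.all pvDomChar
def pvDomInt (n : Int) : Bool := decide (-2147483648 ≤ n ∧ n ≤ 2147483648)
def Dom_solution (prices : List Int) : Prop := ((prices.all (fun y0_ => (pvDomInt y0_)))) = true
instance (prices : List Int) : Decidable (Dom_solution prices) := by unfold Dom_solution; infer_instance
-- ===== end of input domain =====

-- B replaces A's monotonic stack by a per-index forward scan for the first strictly
-- smaller later price (simpler; not faster).

-- ===== PORT A =====
-- the inner `while stack and stack[-1][0] > prices[i]` loop (stack head = stack top)
def popStep (x : Int) (i : Nat) : List (Int × Nat) → List Int → List (Int × Nat) × List Int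
  | [], ans => ([], ans)
  | (v, k) :: st, ans =>
    if x < v then popStep x i st (ans.set k ((i : Int) - (k : Int)))
    else ((v, k) :: st, ans)

-- the trailing `while stack` drain loop
def finalPop (n : Nat) : List (Int × Nat) → List Int → List Int
  | [], ans => ans
  | (_, k) :: st, ans => finalPop n st (ans.set k ((n : Int) - 1 - (k : Int)))

def solution (prices : List Int) : List Int :=
  let n := prices.length
  let s := (List.range n).foldl
    (fun (s : List (Int × Nat) × List Int) i =>
      ((prices.getD i 0, i) :: (popStep (prices.getD i 0) i s.1 s.2).1,
       (popStep (prices.getD i 0) i s.1 s.2).2))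
    ([], List.replicate n 0)
  finalPop n s.1 s.2

-- ===== PORT B =====
def solution_alt (prices : List Int) : List Int :=
  let n := prices.length
  (List.range n).map (fun i =>
    match (List.range' (i + 1) (n - (i + 1))).find?
        (fun j => decide (prices.getD j 0 < prices.getD i 0)) with
    | some j => (j : Int) - (i : Int)
    | none => (n : Int) - 1 - (i : Int))

-- ===== PRECONDITION & SPEC =====
def Spec_solution (prices : List Int) (out : List Int) : Prop := out = solution_alt prices
instance (prices : List Int) (out : List Int) : Decidable (Spec_solution prices out) := by unfold Spec_solution; infer_instance

-- ===== CLAIM (what is proved, stated in full; the proofs are below) =====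
def Claim_equal_solution : Prop := ∀ (prices : List Int), Dom_solution prices → Spec_solution prices (solution prices)

-- ===== LEMMAS AND PROOFS =====

-- `ok prices i k`: index k is still unresolved after processing prices[0:i]
def ok (prices : List Int) (i k : Nat) : Bool :=
  (List.range' (k + 1) (i - (k + 1))).all (fun m => decide (prices.getD k 0 ≤ prices.getD m 0))

-- the indices on A's stack after processing prices[0:i], top (= head) first
def surv (prices : List Int) (i : Nat) : List Nat :=
  ((List.range i).filter (fun k => ok prices i k)).reverse

-- B's value at index i
def fVal (prices : List Int) (i : Nat) : Int :=
  match (List.range' (i + 1) (prices.length - (i + 1))).find?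
      (fun j => decide (prices.getD j 0 < prices.getD i 0)) with
  | some j => (j : Int) - (i : Int)
  | none => (prices.length : Int) - 1 - (i : Int)

-- A's answer list after processing prices[0:i]
def ansOf (prices : List Int) (i : Nat) : List Int :=
  (List.range prices.length).map
    (fun k => if k < i ∧ ok prices i k = false then fVal prices k else 0)

theorem mem_surv {prices : List Int} {i k : Nat} :
    k ∈ surv prices i ↔ k < i ∧ ok prices i k = true := by
  simp [surv, List.mem_filter]

theorem ok_of_ge {prices : List Int} {i k : Nat} (h : i ≤ k + 1) : ok prices i k = true := by
  simp [ok, Nat.sub_eq_zero_of_le h]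

theorem ok_succ {prices : List Int} {i k : Nat} (h : k < i) :
    ok prices (i + 1) k = (ok prices i k && decide (prices.getD k 0 ≤ prices.getD i 0)) := by
  have h1 : i + 1 - (k + 1) = (i - (k + 1)) + 1 := by omega
  have h2 : k + 1 + 1 * (i - (k + 1)) = i := by omega
  rw [ok, h1, List.range'_concat, h2, List.all_append]
  simp [ok]

theorem surv_succ (prices : List Int) (i : Nat) :
    surv prices (i + 1)
      = i :: (surv prices i).filter (fun k => decide (prices.getD k 0 ≤ prices.getD i 0)) := by
  have hfi : (List.range i).filter (fun k => ok prices (i + 1) k)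
      = ((List.range i).filter (fun k => ok prices i k)).filter
          (fun k => decide (prices.getD k 0 ≤ prices.getD i 0)) := by
    rw [List.filter_filter]
    apply List.filter_congr
    intro k hk
    rw [List.mem_range] at hk
    rw [ok_succ hk]
    exact Bool.and_comm _ _
  rw [surv, List.range_succ, List.filter_append, hfi]
  simp [surv, ok_of_ge (le_refl (i + 1)), List.filter_reverse]

theorem surv_pairwise (prices : List Int) (i : Nat) :
    (surv prices i).Pairwise (fun a b => prices.getD b 0 ≤ prices.getD a 0) := by
  have h1 : (surv prices i).Pairwise (fun a b => b < a) := by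
    rw [surv, List.pairwise_reverse]
    exact List.Pairwise.filter _ List.pairwise_lt_range
  refine h1.imp_of_mem ?_
  intro a b ha hb hlt
  rw [mem_surv] at ha hb
  obtain ⟨ha1, _⟩ := ha
  obtain ⟨hb1, hb2⟩ := hb
  have hmem : a ∈ List.range' (b + 1) (i - (b + 1)) := by
    rw [List.mem_range'_1]; omega
  have := (List.all_eq_true.mp hb2) a hmem
  simpa using this

theorem popStep_spec (prices : List Int) (x : Int) (i : Nat) (l : List Nat) :
    ∀ (ans : List Int),
    l.Pairwise (fun a b => prices.getD b 0 ≤ prices.getD a 0) →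
    popStep x i (l.map (fun k => (prices.getD k 0, k))) ans =
      ((l.filter (fun k => decide (prices.getD k 0 ≤ x))).map (fun k => (prices.getD k 0, k)),
       (l.filter (fun k => !decide (prices.getD k 0 ≤ x))).foldl
          (fun a k => a.set k ((i : Int) - (k : Int))) ans) := by
  induction l with
  | nil => intro ans _; rfl
  | cons k t ih =>
    intro ans hp
    rw [List.pairwise_cons] at hp
    by_cases hx : x < prices.getD k 0
    · have hk : (decide (prices.getD k 0 ≤ x)) = false := by
        simp only [decide_eq_false_iff_not, not_le]; exact hx
      rw [List.map_cons]
      simp only [popStep]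
      rw [if_pos hx, ih _ hp.2,
        List.filter_cons_of_neg (p := fun k => decide (prices.getD k 0 ≤ x)) (by simpa using hx),
        List.filter_cons_of_pos (p := fun k => !decide (prices.getD k 0 ≤ x)) (by simpa using hx),
        List.foldl_cons]
    · have hk : (decide (prices.getD k 0 ≤ x)) = true := by
        simp only [decide_eq_true_eq]; exact not_lt.mp hx
      have ht : ∀ b ∈ t, (decide (prices.getD b 0 ≤ x)) = true := by
        intro b hb
        simp only [decide_eq_true_eq] at hk ⊢
        exact le_trans (hp.1 b hb) hk
      have h2 : t.filter (fun b => decide (prices.getD b 0 ≤ x)) = t :=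
        List.filter_eq_self.mpr ht
      have h3 : t.filter (fun b => !decide (prices.getD b 0 ≤ x)) = [] := by
        rw [List.filter_eq_nil_iff]
        intro b hb
        rw [ht b hb]
        simp
      rw [List.map_cons]
      simp only [popStep]
      rw [if_neg hx,
        List.filter_cons_of_pos (p := fun k => decide (prices.getD k 0 ≤ x)) (by simpa using not_lt.mp hx),
        List.filter_cons_of_neg (p := fun k => !decide (prices.getD k 0 ≤ x)) (by simpa using not_lt.mp hx),
        h2, h3]
      rfl

theorem set_range_map {n k : Nat} (hk : k < n) (g : Nat → Int) (v : Int) :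
    ((List.range n).map g).set k v
      = (List.range n).map (fun m => if m = k then v else g m) := by
  apply List.ext_getElem
  · simp
  · intro j hj1 hj2
    simp only [List.getElem_set, List.getElem_map, List.getElem_range]
    rcases eq_or_ne k j with h | h
    · simp [h]
    · rw [if_neg h, if_neg (fun hh => h hh.symm)]

theorem foldl_set_range_map {n : Nat} (g : Nat → Int) :
    ∀ (l : List Nat) (h : Nat → Int), (∀ k ∈ l, k < n) →
    l.foldl (fun a k => a.set k (g k)) ((List.range n).map h)
      = (List.range n).map (fun m => if m ∈ l then g m else h m) := by
  intro l
  induction l with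
  | nil => intro h _; simp
  | cons k t ih =>
    intro h hk
    have hkn : k < n := hk k List.mem_cons_self
    rw [List.foldl_cons, set_range_map hkn h (g k),
      ih _ (fun b hb => hk b (List.mem_cons_of_mem _ hb))]
    apply List.map_congr_left
    intro m hm
    by_cases h1 : m ∈ t
    · simp [h1]
    · by_cases h2 : m = k <;> simp [h1, h2]

theorem fVal_popped {prices : List Int} {i k : Nat} (hk : k < i) (hi : i < prices.length)
    (hok : ok prices i k = true) (hlt : prices.getD i 0 < prices.getD k 0) :
    fVal prices k = (i : Int) - (k : Int) := by
  have e1 : prices.length - (k + 1) = (i - (k + 1)) + (prices.length - i) := by omega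
  have e2 : k + 1 + 1 * (i - (k + 1)) = i := by omega
  have hsplit := List.range'_append (s := k + 1) (m := i - (k + 1)) (n := prices.length - i) (step := 1)
  rw [e2] at hsplit
  rw [fVal, e1, ← hsplit, List.find?_append]
  have hn : (List.range' (k + 1) (i - (k + 1))).find?
      (fun j => decide (prices.getD j 0 < prices.getD k 0)) = none := by
    rw [List.find?_eq_none]
    intro m hm
    have := (List.all_eq_true.mp hok) m hm
    simp only [decide_eq_true_eq] at this
    simp only [decide_eq_true_eq, not_lt]
    exact this
  rw [hn]
  have e3 : prices.length - i = (prices.length - i - 1) + 1 := by omega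
  rw [e3, List.range'_succ, List.find?_cons_of_pos (by simpa using hlt)]
  rfl

theorem fVal_surv {prices : List Int} {k : Nat} (hk : k < prices.length)
    (hok : ok prices prices.length k = true) :
    fVal prices k = (prices.length : Int) - 1 - (k : Int) := by
  have hn : (List.range' (k + 1) (prices.length - (k + 1))).find?
      (fun j => decide (prices.getD j 0 < prices.getD k 0)) = none := by
    rw [List.find?_eq_none]
    intro m hm
    have := (List.all_eq_true.mp hok) m hm
    simp only [decide_eq_true_eq] at this
    simp only [decide_eq_true_eq, not_lt]
    exact this
  rw [fVal, hn]

theorem finalPop_eq_foldl (n : Nat) (prices : List Int) :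
    ∀ (l : List Nat) (ans : List Int),
    finalPop n (l.map (fun k => (prices.getD k 0, k))) ans
      = l.foldl (fun a k => a.set k ((n : Int) - 1 - (k : Int))) ans := by
  intro l
  induction l with
  | nil => intro ans; rfl
  | cons k t ih => intro ans; simp only [List.map_cons, finalPop]; exact ih _

theorem invariant (prices : List Int) :
    ∀ i, i ≤ prices.length →
    (List.range i).foldl
      (fun (s : List (Int × Nat) × List Int) j =>
        ((prices.getD j 0, j) :: (popStep (prices.getD j 0) j s.1 s.2).1,
         (popStep (prices.getD j 0) j s.1 s.2).2))
      ([], List.replicate prices.length 0)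
    = ((surv prices i).map (fun k => (prices.getD k 0, k)), ansOf prices i) := by
  intro i
  induction i with
  | zero =>
    intro _
    have h0 : ansOf prices 0 = List.replicate prices.length 0 := by
      unfold ansOf
      apply List.ext_getElem
      · simp
      · intro j hj1 hj2; simp
    simp [surv, h0]
  | succ i ih =>
    intro hle
    have hi : i < prices.length := by omega
    rw [List.range_succ, List.foldl_append, ih (by omega)]
    simp only [List.foldl_cons, List.foldl_nil]
    rw [popStep_spec prices (prices.getD i 0) i (surv prices i) (ansOf prices i)
      (surv_pairwise prices i)]
    have hbound : ∀ k ∈ (surv prices i).filter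
        (fun k => !decide (prices.getD k 0 ≤ prices.getD i 0)), k < prices.length := by
      intro k hk
      rw [List.mem_filter, mem_surv] at hk
      omega
    have hstack : ((prices.getD i 0, i) ::
        ((surv prices i).filter (fun k => decide (prices.getD k 0 ≤ prices.getD i 0))).map
          (fun k => (prices.getD k 0, k)))
        = (surv prices (i + 1)).map (fun k => (prices.getD k 0, k)) := by
      rw [surv_succ]; rfl
    have hans : ((surv prices i).filter (fun k => !decide (prices.getD k 0 ≤ prices.getD i 0))).foldl
        (fun a k => a.set k ((i : Int) - (k : Int))) (ansOf prices i) = ansOf prices (i + 1) := by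
      conv_lhs => rw [ansOf]
      rw [foldl_set_range_map (fun k => (i : Int) - (k : Int)) _ _ hbound]
      rw [ansOf]
      apply List.map_congr_left
      intro m hm
      rw [List.mem_range] at hm
      by_cases hmem : m ∈ (surv prices i).filter
          (fun k => !decide (prices.getD k 0 ≤ prices.getD i 0))
      · rw [if_pos hmem]
        rw [List.mem_filter, mem_surv] at hmem
        obtain ⟨⟨hmi, hokm⟩, hgt⟩ := hmem
        have hgt' : prices.getD i 0 < prices.getD m 0 := by
          simp only [Bool.not_eq_eq_eq_not, Bool.not_true, decide_eq_false_iff_not, not_le] at hgt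
          exact hgt
        have hok1 : ok prices (i + 1) m = false := by
          rw [ok_succ hmi, hokm]
          simp only [Bool.true_and, decide_eq_false_iff_not, not_le]
          exact hgt'
        rw [if_pos ⟨by omega, hok1⟩, fVal_popped hmi hi hokm hgt']
      · rw [if_neg hmem]
        rcases lt_trichotomy m i with hmi | hmi | hmi
        · by_cases hok : ok prices i m = true
          · have hle' : (decide (prices.getD m 0 ≤ prices.getD i 0)) = true := by
              by_contra hc
              exact hmem (List.mem_filter.mpr ⟨mem_surv.mpr ⟨hmi, hok⟩, by
                simp only [Bool.not_eq_eq_eq_not, Bool.not_true]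
                exact Bool.eq_false_iff.mpr hc⟩)
            have hok1 : ok prices (i + 1) m = true := by
              rw [ok_succ hmi, hok, hle']; rfl
            rw [if_neg (by rintro ⟨_, hf⟩; rw [hok] at hf; cases hf),
              if_neg (by rintro ⟨_, hf⟩; rw [hok1] at hf; cases hf)]
          · have hok' : ok prices i m = false := Bool.eq_false_iff.mpr hok
            have hok1 : ok prices (i + 1) m = false := by
              rw [ok_succ hmi, hok']; rfl
            rw [if_pos ⟨hmi, hok'⟩, if_pos ⟨by omega, hok1⟩]
        · subst hmi
          have h1 : ok prices (m + 1) m = true := ok_of_ge (le_refl _)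
          rw [if_neg (by rintro ⟨hf, _⟩; omega),
            if_neg (by rintro ⟨_, hf⟩; rw [h1] at hf; cases hf)]
        · rw [if_neg (by rintro ⟨hf, _⟩; omega), if_neg (by rintro ⟨hf, _⟩; omega)]
    rw [hstack, hans]

theorem solution_eq_alt (prices : List Int) : solution prices = solution_alt prices := by
  have hinv := invariant prices prices.length (le_refl _)
  have hbound : ∀ k ∈ surv prices prices.length, k < prices.length :=
    fun k hk => (mem_surv.mp hk).1
  simp only [solution]
  rw [hinv]
  simp only
  rw [finalPop_eq_foldl prices.length prices (surv prices prices.length) (ansOf prices prices.length)]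
  conv_lhs => rw [ansOf]
  rw [foldl_set_range_map (fun k => (prices.length : Int) - 1 - (k : Int)) _ _ hbound]
  simp only [solution_alt]
  apply List.map_congr_left
  intro m hm
  rw [List.mem_range] at hm
  have hrhs : (match (List.range' (m + 1) (prices.length - (m + 1))).find?
      (fun j => decide (prices.getD j 0 < prices.getD m 0)) with
    | some j => (j : Int) - (m : Int)
    | none => (prices.length : Int) - 1 - (m : Int)) = fVal prices m := rfl
  rw [hrhs]
  by_cases hmem : m ∈ surv prices prices.length
  · rw [if_pos hmem, fVal_surv hm (mem_surv.mp hmem).2]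
  · rw [if_neg hmem]
    have hok : ok prices prices.length m = false := by
      rcases Bool.eq_false_or_eq_true (ok prices prices.length m) with h | h
      · exact absurd (mem_surv.mpr ⟨hm, h⟩) hmem
      · exact h
    rw [if_pos ⟨hm, hok⟩]

-- ===== VERDICT (by name: the statement is the Claim_ definition above) =====
theorem solution_spec : Claim_equal_solution := by
  intro prices _
  exact solution_eq_alt prices
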